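-- pv_equiv track=rewrite | github.com/Javitito/ajax-kernel | agency/p0_leann.py | _detect_ref_signals
-- ===== SOURCE A (Python) =====
-- from typing import Any, Dict, Iterable, List, Optional
--
-- def _detect_ref_signals(text: str) -> List[str]:
--     lowered = text.lower()
--     signals: List[str] = []
--
--     def _add(value: str) -> None:
--         if value not in signals:
--             signals.append(value)
--
--     if "latency" in lowered and any(
--         tag in lowered for tag in ("high", "slow", "timeout", "too high")
--     ):
--         _add("latency_too_high")
--     elif "latency" in lowered:
--         _add("latency")
--
--     if "probe" in lowered and any(tag in lowered for tag in ("fail", "error", "timeout")):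
--         _add("probe_failed")
--     elif "probe" in lowered:
--         _add("probe_issue")
--
--     if any(tag in lowered for tag in ("timeout", "timed out")):
--         _add("timeout")
--     if any(tag in lowered for tag in ("fail", "error", "exception")):
--         _add("failure")
--     if any(tag in lowered for tag in ("success", "ok", "passed")):
--         _add("success")
--
--     return signals
-- ===== SOURCE B (Python) =====
-- def _detect_ref_signals(text):
--     lowered = text.lower()
--     signals = []
--     # Conditional rules: (primary keyword, escalation tags, escalated signal, plain signal)
--     cond_rules = [
--         ("latency", ("high", "slow", "timeout", "too high"), "latency_too_high", "latency"),
--         ("probe", ("fail", "error", "timeout"), "probe_failed", "probe_issue"),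
--     ]
--     for primary, tags, escalated, plain in cond_rules:
--         if primary in lowered:
--             signals.append(escalated if any(t in lowered for t in tags) else plain)
--     # Simple rules: (tags, signal)
--     simple_rules = [
--         (("timeout", "timed out"), "timeout"),
--         (("fail", "error", "exception"), "failure"),
--         (("success", "ok", "passed"), "success"),
--     ]
--     for tags, sig in simple_rules:
--         if any(t in lowered for t in tags):
--             signals.append(sig)
--     return signals
-- ===== Notes on version B (the rewrite author's own statement) =====
-- stated objective: idiomatic
-- what changed: Replaced the hard-coded if/elif chain and the closure-based dedup helper with two declarative rule tables (conditional escalation rules and simple tag rules) iterated in order; since all signal names are distinct the dedup check is dropped.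
import Mathlib
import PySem

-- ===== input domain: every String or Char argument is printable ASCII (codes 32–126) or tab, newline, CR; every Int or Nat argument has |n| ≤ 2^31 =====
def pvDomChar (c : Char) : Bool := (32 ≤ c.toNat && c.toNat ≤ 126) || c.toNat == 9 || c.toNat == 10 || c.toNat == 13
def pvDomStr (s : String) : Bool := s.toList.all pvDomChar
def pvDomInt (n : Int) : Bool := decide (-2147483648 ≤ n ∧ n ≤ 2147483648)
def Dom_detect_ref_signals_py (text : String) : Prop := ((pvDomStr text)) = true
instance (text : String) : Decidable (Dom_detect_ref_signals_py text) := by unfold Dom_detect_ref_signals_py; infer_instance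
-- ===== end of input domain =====

-- B replaces A's if/elif chain and closure dedup with two declarative rule tables folded in order (idiomatic; signal names are distinct so no dedup is needed).


-- ===== PORT A =====
-- _add: append value only if not already present
def pyAdd (signals : List String) (value : String) : List String :=
  if value ∈ signals then signals else signals ++ [value]

def detect_ref_signals_py (text : String) : List String :=
  let lowered := PySem.Str.lower text
  let signals : List String := []
  let signals :=
    if PySem.Str.isIn "latency" lowered &&
       (PySem.Str.isIn "high" lowered || PySem.Str.isIn "slow" lowered ||
        PySem.Str.isIn "timeout" lowered || PySem.Str.isIn "too high" lowered) then
      pyAdd signals "latency_too_high"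
    else if PySem.Str.isIn "latency" lowered then pyAdd signals "latency"
    else signals
  let signals :=
    if PySem.Str.isIn "probe" lowered &&
       (PySem.Str.isIn "fail" lowered || PySem.Str.isIn "error" lowered ||
        PySem.Str.isIn "timeout" lowered) then
      pyAdd signals "probe_failed"
    else if PySem.Str.isIn "probe" lowered then pyAdd signals "probe_issue"
    else signals
  let signals :=
    if PySem.Str.isIn "timeout" lowered || PySem.Str.isIn "timed out" lowered then
      pyAdd signals "timeout"
    else signals
  let signals :=
    if PySem.Str.isIn "fail" lowered || PySem.Str.isIn "error" lowered ||
       PySem.Str.isIn "exception" lowered then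
      pyAdd signals "failure"
    else signals
  let signals :=
    if PySem.Str.isIn "success" lowered || PySem.Str.isIn "ok" lowered ||
       PySem.Str.isIn "passed" lowered then
      pyAdd signals "success"
    else signals
  signals

-- ===== PORT B =====
-- B: declarative rule tables, folded in order; no dedup (all signal names distinct).
def condRules : List (String × List String × String × String) :=
  [("latency", ["high", "slow", "timeout", "too high"], "latency_too_high", "latency"),
   ("probe", ["fail", "error", "timeout"], "probe_failed", "probe_issue")]

def simpleRules : List (List String × String) :=
  [(["timeout", "timed out"], "timeout"),
   (["fail", "error", "exception"], "failure"),
   (["success", "ok", "passed"], "success")]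

def detect_ref_signals_py_alt (text : String) : List String :=
  let lowered := PySem.Str.lower text
  let signals := condRules.foldl
    (fun acc r =>
      if PySem.Str.isIn r.1 lowered then
        acc ++ [if r.2.1.any (fun t => PySem.Str.isIn t lowered) then r.2.2.1 else r.2.2.2]
      else acc) []
  simpleRules.foldl
    (fun acc r =>
      if r.1.any (fun t => PySem.Str.isIn t lowered) then acc ++ [r.2] else acc) signals

-- ===== PRECONDITION & SPEC =====
def Spec_detect_ref_signals_py (text : String) (out : List String) : Prop := out = detect_ref_signals_py_alt text
instance (text : String) (out : List String) : Decidable (Spec_detect_ref_signals_py text out) := by unfold Spec_detect_ref_signals_py; infer_instance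

-- ===== CLAIM (what is proved, stated in full; the proofs are below) =====
def Claim_equal_detect_ref_signals_py : Prop := ∀ (text : String), Dom_detect_ref_signals_py text → Spec_detect_ref_signals_py text (detect_ref_signals_py text)

-- ===== LEMMAS AND PROOFS =====

-- ===== VERDICT (by name: the statement is the Claim_ definition above) =====
theorem detect_ref_signals_py_spec : Claim_equal_detect_ref_signals_py := by
  intro text _
  unfold Spec_detect_ref_signals_py detect_ref_signals_py detect_ref_signals_py_alt
  simp only [condRules, simpleRules, List.foldl, List.any_cons, List.any_nil, Bool.or_false]
  generalize PySem.Str.isIn "latency" (PySem.Str.lower text) = b1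
  generalize PySem.Str.isIn "high" (PySem.Str.lower text) = b2
  generalize PySem.Str.isIn "slow" (PySem.Str.lower text) = b3
  generalize PySem.Str.isIn "timeout" (PySem.Str.lower text) = b4
  generalize PySem.Str.isIn "too high" (PySem.Str.lower text) = b5
  generalize PySem.Str.isIn "probe" (PySem.Str.lower text) = b6
  generalize PySem.Str.isIn "fail" (PySem.Str.lower text) = b7
  generalize PySem.Str.isIn "error" (PySem.Str.lower text) = b8
  generalize PySem.Str.isIn "timed out" (PySem.Str.lower text) = b9
  generalize PySem.Str.isIn "exception" (PySem.Str.lower text) = b10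
  generalize PySem.Str.isIn "success" (PySem.Str.lower text) = b11
  generalize PySem.Str.isIn "ok" (PySem.Str.lower text) = b12
  generalize PySem.Str.isIn "passed" (PySem.Str.lower text) = b13
  revert b1 b2 b3 b4 b5 b6 b7 b8 b9 b10 b11 b12 b13
  decide
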